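-- pv_equiv track=rewrite | github.com/XinleCao/Frequency-revealing-Attack | VLDB21/Li_encryption.py | list_bisect_right
-- ===== SOURCE A (Python) =====
-- def list_bisect_right(a, x, lo=0, hi=None):
--     """Return the index where to insert item x in list a, assuming a is sorted.
--
--     The return value i is such that all e in a[:i] have e <= x, and all e in
--     a[i:] have e > x.  So if x already appears in the list, a.insert(x) will
--     insert just after the rightmost x already there.
--
--     Optional args lo (default 0) and hi (default len(a)) bound the
--     slice of a to be searched.
--     """
--
--     if lo < 0:
--         raise ValueError('lo must be non-negative')
--     if hi is None:
--         hi = len(a)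
--     while lo < hi:
--         mid = (lo+hi)//2
--         if x[0] < a[mid][0]: hi = mid
--         else: lo = mid+1
--     return lo
-- ===== SOURCE B (Python) =====
-- def _offset(seg, key):
--     """Insertion offset of key within segment seg, by divide-and-conquer on
--     the actual sublists: recurse into the half that the middle element selects."""
--     if not seg:
--         return 0
--     mid = len(seg) // 2
--     if key < seg[mid][0]:
--         return _offset(seg[:mid], key)
--     return mid + 1 + _offset(seg[mid+1:], key)
--
--
-- def list_bisect_right(a, x, lo=0, hi=None):
--     """Return the index where to insert item x in list a, assuming a is sorted."""
--     if lo < 0: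
--         raise ValueError('lo must be non-negative')
--     if hi is None:
--         hi = len(a)
--     return lo + _offset(a[lo:max(lo, hi)], x[0])
-- ===== Notes on version B (the rewrite author's own statement) =====
-- stated objective: alternative
-- what changed: Replaces the in-place (lo,hi) index loop with a recursive divide-and-conquer helper that works on actual sublists: it slices the searched segment out of a once, then recurses on seg[:mid] or seg[mid+1:], returning an insertion OFFSET that the wrapper adds to lo; no index bookkeeping survives.
-- outside the precondition, e.g. on list_bisect_right([(5, 0), (6, 0)], (0, 0), 0, 3): A returns 0, B returns 0
import Mathlib
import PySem

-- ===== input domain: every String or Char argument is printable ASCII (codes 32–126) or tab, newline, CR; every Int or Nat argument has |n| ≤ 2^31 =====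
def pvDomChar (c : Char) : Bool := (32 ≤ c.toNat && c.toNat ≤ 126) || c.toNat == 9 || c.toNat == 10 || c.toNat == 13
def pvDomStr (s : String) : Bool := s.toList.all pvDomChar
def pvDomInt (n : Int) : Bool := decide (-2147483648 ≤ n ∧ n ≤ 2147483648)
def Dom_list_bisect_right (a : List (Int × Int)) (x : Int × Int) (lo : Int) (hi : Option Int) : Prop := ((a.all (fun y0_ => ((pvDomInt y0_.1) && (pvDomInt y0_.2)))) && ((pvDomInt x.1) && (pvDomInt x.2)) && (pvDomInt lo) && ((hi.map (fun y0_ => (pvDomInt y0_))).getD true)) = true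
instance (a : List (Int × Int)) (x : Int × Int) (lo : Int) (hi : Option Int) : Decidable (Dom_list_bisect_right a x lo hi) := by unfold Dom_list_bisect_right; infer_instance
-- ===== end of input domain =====

-- B replaces A's (lo,hi) index loop by a recursive divide-and-conquer helper on actual
-- sublists (slice once, recurse on seg[:mid] / seg[mid+1:], return an offset added to lo);
-- same results on Pre_. A raises ValueError for lo < 0 (excluded by Pre_).

-- ===== PORT A =====
-- the while loop of A over the state (lo, hi); a[mid] via pyGet? (in range inside Pre_,
-- default (0,0) is never reached there)
def pvLoopA (a : List (Int × Int)) (x : Int × Int) (lo hi : Int) : Int :=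
  if h : lo < hi then
    let mid := PySem.Int.floordiv (lo + hi) 2
    if x.1 < ((PySem.List.pyGet? a mid).getD (0, 0)).1 then
      pvLoopA a x lo mid
    else
      pvLoopA a x (mid + 1) hi
  else lo
termination_by (hi - lo).toNat
decreasing_by
  · have := (PySem.Int.floordiv_two_mid_bounds (le_of_lt h))
    have h2 : PySem.Int.floordiv (lo + hi) 2 = (lo + hi) / 2 :=
      PySem.Int.floordiv_eq_ediv_of_pos (by omega)
    omega
  · have := (PySem.Int.floordiv_two_mid_bounds (le_of_lt h))
    have h2 : PySem.Int.floordiv (lo + hi) 2 = (lo + hi) / 2 :=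
      PySem.Int.floordiv_eq_ediv_of_pos (by omega)
    omega

def list_bisect_right (a : List (Int × Int)) (x : Int × Int) (lo : Int) (hi : Option Int) : Int :=
  if lo < 0 then lo   -- Python raises ValueError here; excluded by Pre_
  else pvLoopA a x lo (hi.getD (a.length : Int))

-- ===== PORT B =====
-- B's recursive helper _offset on the sublist itself; seg[mid] via pyGet? (always in
-- range: mid = len//2 < len for nonempty seg)
def pvOffset (seg : List (Int × Int)) (key : Int) : Int :=
  if hseg : seg = [] then 0
  else
    let mid := PySem.Int.floordiv (seg.length : Int) 2
    if key < ((PySem.List.pyGet? seg mid).getD (0, 0)).1 then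
      pvOffset (PySem.List.slice seg (some 0) (some mid)) key
    else
      mid + 1 + pvOffset (PySem.List.slice seg (some (mid + 1)) none) key
termination_by seg.length
decreasing_by
  · have hlen : 0 < seg.length := List.length_pos_iff.mpr hseg
    have h2 : PySem.Int.floordiv (seg.length : Int) 2 = ((seg.length / 2 : Nat) : Int) :=
      PySem.Int.floordiv_natCast seg.length 2
    rw [h2, PySem.List.slice_zero_start, PySem.List.slice_to_natCast]
    simp only [List.length_take]
    omega
  · have hlen : 0 < seg.length := List.length_pos_iff.mpr hseg
    have h2 : PySem.Int.floordiv (seg.length : Int) 2 = ((seg.length / 2 : Nat) : Int) :=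
      PySem.Int.floordiv_natCast seg.length 2
    have h3 : ((seg.length / 2 : Nat) : Int) + 1 = (((seg.length / 2 + 1 : Nat)) : Int) := by
      push_cast; ring
    rw [h2, h3, PySem.List.slice_from_natCast]
    simp only [List.length_drop]
    omega

def list_bisect_right_alt (a : List (Int × Int)) (x : Int × Int) (lo : Int) (hi : Option Int) : Int :=
  if lo < 0 then lo   -- Python raises ValueError here; excluded by Pre_
  else
    let h := hi.getD (a.length : Int)
    lo + pvOffset (PySem.List.slice a (some lo) (some (max lo h))) x.1

-- ===== PRECONDITION & SPEC =====
-- Pre_ excludes lo < 0 (A raises ValueError) and an explicit hi beyond len(a) with lo < hi,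
-- where the search may probe an index past the end of the list and raise IndexError
-- (depending on the data it compares against, it can also return normally).
def Pre_list_bisect_right (a : List (Int × Int)) (x : Int × Int) (lo : Int) (hi : Option Int) : Prop :=
  0 ≤ lo ∧ (lo < hi.getD (a.length : Int) → hi.getD (a.length : Int) ≤ (a.length : Int))
instance (a : List (Int × Int)) (x : Int × Int) (lo : Int) (hi : Option Int) : Decidable (Pre_list_bisect_right a x lo hi) := by unfold Pre_list_bisect_right; infer_instance

def pvWitness_list_bisect_right : (List (Int × Int)) × (Int × Int) × Int × Option Int :=
  ([], (0, 0), 0, none)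

def Spec_list_bisect_right (a : List (Int × Int)) (x : Int × Int) (lo : Int) (hi : Option Int) (out : Int) : Prop := out = list_bisect_right_alt a x lo hi
instance (a : List (Int × Int)) (x : Int × Int) (lo : Int) (hi : Option Int) (out : Int) : Decidable (Spec_list_bisect_right a x lo hi out) := by unfold Spec_list_bisect_right; infer_instance

-- ===== CLAIM (what is proved, stated in full; the proofs are below) =====
def Claim_equal_list_bisect_right : Prop := ∀ (a : List (Int × Int)) (x : Int × Int) (lo : Int) (hi : Option Int), Dom_list_bisect_right a x lo hi → Pre_list_bisect_right a x lo hi → Spec_list_bisect_right a x lo hi (list_bisect_right a x lo hi)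

-- ===== LEMMAS AND PROOFS =====

-- A's loop over (lo, hi) equals lo plus B's offset over the segment a[lo:hi]
-- (represented as (a.drop lo.toNat).take (hi-lo).toNat): the segment midpoint len//2
-- is A's mid shifted by lo, and the two recursions visit the same halves.
theorem pvLoop_eq_offset (a : List (Int × Int)) (x : Int × Int) :
    ∀ (n : Nat) (lo hi : Int), 0 ≤ lo → hi ≤ (a.length : Int) → (hi - lo).toNat = n →
      pvLoopA a x lo hi = lo + pvOffset ((a.drop lo.toNat).take n) x.1 := by
  intro n
  induction n using Nat.strong_induction_on with
  | _ n ih =>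
    intro lo hi h0 hhi hn
    by_cases h : lo < hi
    · have hnpos : 0 < n := by omega
      set seg := (a.drop lo.toNat).take n with hsegdef
      have hseglen : seg.length = n := by
        simp only [hsegdef, List.length_take, List.length_drop]
        omega
      have hsegne : seg ≠ [] := by
        intro hc; rw [hc] at hseglen; simp at hseglen; omega
      have hmid : PySem.Int.floordiv (lo + hi) 2 = (lo + hi) / 2 :=
        PySem.Int.floordiv_eq_ediv_of_pos (by omega)
      have hsegmid : PySem.Int.floordiv (seg.length : Int) 2 = ((n / 2 : Nat) : Int) := by
        rw [hseglen]; exact PySem.Int.floordiv_natCast n 2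
      -- the two probed elements are the same element of a
      have habs : PySem.Int.floordiv (lo + hi) 2 = lo + ((n / 2 : Nat) : Int) := by
        rw [hmid]; omega
      have hel : ((PySem.List.pyGet? a (PySem.Int.floordiv (lo + hi) 2)).getD (0, 0)) =
          ((PySem.List.pyGet? seg (PySem.Int.floordiv (seg.length : Int) 2)).getD (0, 0)) := by
        rw [habs, hsegmid]
        have h1 : lo + ((n / 2 : Nat) : Int) = ((lo.toNat + n / 2 : Nat) : Int) := by
          push_cast; omega
        rw [h1, PySem.List.pyGet?_natCast, PySem.List.pyGet?_natCast]
        congr 1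
        rw [hsegdef, List.getElem?_take_of_lt (by omega), List.getElem?_drop]
      rw [pvLoopA, dif_pos h, pvOffset, dif_neg hsegne]
      simp only [hel]
      by_cases hc : x.1 < ((PySem.List.pyGet? seg (PySem.Int.floordiv (seg.length : Int) 2)).getD (0, 0)).1
      · rw [if_pos hc, if_pos hc]
        -- left half: a[lo : lo + n/2]
        have hrec := ih (n / 2) (by omega) lo (PySem.Int.floordiv (lo + hi) 2)
          h0 (by rw [habs]; push_cast; omega) (by rw [habs]; omega)
        rw [hrec]
        congr 2
        rw [hsegmid, hsegdef, PySem.List.slice_zero_start, PySem.List.slice_to_natCast,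
          List.take_take]
        congr 1
        omega
      · rw [if_neg hc, if_neg hc]
        -- right half: a[lo + n/2 + 1 : hi]
        have hlo' : PySem.Int.floordiv (lo + hi) 2 + 1 = ((lo.toNat + (n / 2 + 1) : Nat) : Int) := by
          rw [habs]; push_cast; omega
        have hrec := ih (n - (n / 2 + 1)) (by omega) (PySem.Int.floordiv (lo + hi) 2 + 1) hi
          (by rw [habs]; omega) hhi (by rw [habs]; omega)
        rw [hlo'] at hrec
        simp only [Int.toNat_natCast] at hrec
        have hdrop : seg.drop (n / 2 + 1) = (a.drop (lo.toNat + (n / 2 + 1))).take (n - (n / 2 + 1)) := by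
          rw [hsegdef, List.drop_take, List.drop_drop, Nat.add_comm]
        have hcast : ((n / 2 : Nat) : Int) + 1 = ((n / 2 + 1 : Nat) : Int) := by push_cast; ring
        rw [hsegmid, hcast, PySem.List.slice_from_natCast, hdrop, hlo', hrec]
        push_cast
        omega
    · -- empty range: both return lo
      have hn0 : n = 0 := by omega
      rw [pvLoopA, dif_neg h, hn0]
      simp [pvOffset]

-- ===== VERDICT (by name: the statement is the Claim_ definition above) =====
theorem list_bisect_right_spec : Claim_equal_list_bisect_right := by
  intro a x lo hi _ hpre
  obtain ⟨h0, hbound⟩ := hpre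
  unfold Spec_list_bisect_right list_bisect_right list_bisect_right_alt
  rw [if_neg (by omega), if_neg (by omega)]
  have hslice : PySem.List.slice a (some lo) (some (max lo (hi.getD (a.length : Int)))) =
      (a.drop lo.toNat).take ((hi.getD (a.length : Int) - lo).toNat) := by
    rw [PySem.List.slice_toNat a h0 (le_max_left _ _ |>.trans' h0)]
    congr 1
    omega
  simp only [hslice]
  by_cases hlt : lo < hi.getD (a.length : Int)
  · exact pvLoop_eq_offset a x _ lo _ h0 (hbound hlt) rfl
  · rw [pvLoopA, dif_neg hlt]
    have h0' : (hi.getD (a.length : Int) - lo).toNat = 0 := by omega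
    rw [h0']
    simp [pvOffset]
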